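-- pv_equiv track=rewrite | github.com/UberChili/Advent-of-code-2016 | Day4/day4.py | get_letters
-- ===== SOURCE A (Python) =====
-- def get_letters(line: str) -> list:
--     letters = []
--     for i in line:
--         if i.isalpha():
--             letters.append(i)
--         elif i.isdigit():
--             break
--     return letters
-- ===== SOURCE B (Python) =====
-- def get_letters(line: str) -> list:
--     idx = next((i for i, c in enumerate(line) if c.isdigit()), len(line))
--     return [c for c in line[:idx] if c.isalpha()]
-- ===== Notes on version B (the rewrite author's own statement) =====
-- stated objective: idiomatic
-- what changed: Replaces the single branching loop with break by a locate-boundary pass (index of first digit, defaulting to len) followed by a filter over that prefix.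
import Mathlib
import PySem

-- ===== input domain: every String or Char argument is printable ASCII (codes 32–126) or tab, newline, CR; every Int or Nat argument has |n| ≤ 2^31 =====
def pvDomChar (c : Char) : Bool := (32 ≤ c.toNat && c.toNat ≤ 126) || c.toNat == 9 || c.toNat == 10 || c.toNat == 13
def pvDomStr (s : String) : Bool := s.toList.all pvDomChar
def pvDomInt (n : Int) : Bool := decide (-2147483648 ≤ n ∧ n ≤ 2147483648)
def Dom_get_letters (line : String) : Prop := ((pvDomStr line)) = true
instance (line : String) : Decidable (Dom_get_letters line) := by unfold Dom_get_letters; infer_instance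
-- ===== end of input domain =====

-- B computes the boundary (first digit index, default length) first, then filters the alphabetic
-- characters of that prefix — a two-pass decomposition replacing A's single branching loop with break.


-- ===== PORT A =====
-- the for-loop with `break`: append alpha chars, stop at the first digit
def getLettersLoopA : List Char → List Char
  | [] => []
  | c :: cs =>
    if PySem.Chars.isalpha c then c :: getLettersLoopA cs
    else if PySem.Chars.isdigit c then []
    else getLettersLoopA cs

def get_letters (line : String) : List String :=
  (getLettersLoopA line.toList).map (fun c => String.ofList [c])

-- ===== PORT B =====
def get_letters_alt (line : String) : List String :=
  let cs := line.toList
  let idx := ((cs.findIdx? (fun c => PySem.Chars.isdigit c)).getD cs.length)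
  ((cs.take idx).filter (fun c => PySem.Chars.isalpha c)).map (fun c => String.ofList [c])

-- ===== PRECONDITION & SPEC =====
def Spec_get_letters (line : String) (out : List String) : Prop := out = get_letters_alt line
instance (line : String) (out : List String) : Decidable (Spec_get_letters line out) := by unfold Spec_get_letters; infer_instance

-- ===== CLAIM (what is proved, stated in full; the proofs are below) =====
def Claim_equal_get_letters : Prop := ∀ (line : String), Dom_get_letters line → Spec_get_letters line (get_letters line)

-- ===== LEMMAS AND PROOFS =====
theorem getLettersLoopA_eq (cs : List Char) :
    getLettersLoopA cs =
      (cs.take ((cs.findIdx? (fun c => PySem.Chars.isdigit c)).getD cs.length)).filter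
        (fun c => PySem.Chars.isalpha c) := by
  induction cs with
  | nil => rfl
  | cons c cs ih =>
    simp only [getLettersLoopA, List.findIdx?_cons]
    by_cases hd : PySem.Chars.isdigit c
    · have ha : PySem.Chars.isalpha c = false := by
        simp only [PySem.Chars.isalpha, PySem.Chars.isupper, PySem.Chars.islower,
          PySem.Chars.isdigit, Bool.and_eq_true, decide_eq_true_eq, Bool.or_eq_false_iff,
          Bool.and_eq_false_iff, decide_eq_false_iff_not, Char.le_def,
          UInt32.le_iff_toNat_le] at hd ⊢
        have h0 : ('0' : Char).val.toNat = 48 := rfl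
        have h9 : ('9' : Char).val.toNat = 57 := rfl
        have hA : ('A' : Char).val.toNat = 65 := rfl
        have hl : ('a' : Char).val.toNat = 97 := rfl
        omega
      simp [hd, ha]
    · cases hfi : List.findIdx? (fun c => PySem.Chars.isdigit c) cs with
      | none =>
        by_cases ha : PySem.Chars.isalpha c <;>
          simp [hd, hfi, ha, ih]
      | some j =>
        by_cases ha : PySem.Chars.isalpha c <;>
          simp [hd, hfi, ha, ih]

-- ===== VERDICT (by name: the statement is the Claim_ definition above) =====
theorem get_letters_spec : Claim_equal_get_letters := by
  intro line _
  unfold Spec_get_letters get_letters get_letters_alt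
  rw [getLettersLoopA_eq]
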